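-- pv_equiv track=rewrite | github.com/RiccardoMPesce/Unsorted-Solved-Problems | TopCoderDP/triple_path.py | triple_path_finder
-- ===== SOURCE A (Python) =====
-- def triple_path_finder(grid):
--     path = []
--     items = []
--     after_path = []
--     three_paths = []
--
--     for i in range(len(grid)):
--         path += [[]]
--         items += [[]]
--         for j in range(len(grid[i])):
--             path[i] += [0]
--             items[i] += [[]]
--
--     for n in range(3):
--         for i in range(len(grid)):
--             for j in range(len(grid[i])):
--                 if i == 0 and j == 0:
--                     path[i][j] = grid[i][j]
--                     items[i][j] = [(i, j)]
--                 elif i == 0: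
--                     path[i][j] = grid[i][j] + path[i][j - 1]
--                     items[i][j] = items[i][j - 1] + [(i, j)]
--                 elif j == 0:
--                     path[i][j] = grid[i][j] + path[i - 1][j]
--                     items[i][j] = items[i - 1][j] + [(i, j)]
--                 elif i == len(grid) - 1 and j == 0:
--                     path[i][j] = grid[i][j] + path[i - 1][j]
--                     items[i][j] = items[i - 1][j] + [(i, j)]
--                 elif i == 0 and j == len(grid[i]) - 1:
--                     path[i][j] = grid[i][j] + path[i][j - 1]
--                     items[i][j] = items[i][j - 1] + [(i, j)]
--                 else:
--                     if path[i - 1][j] > path[i][j - 1]: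
--                         path[i][j] = grid[i][j] + path[i - 1][j]
--                         items[i][j] = items[i - 1][j] + [(i, j)]
--                     else:
--                         path[i][j] = grid[i][j] + path[i][j - 1]
--                         items[i][j] = items[i][j - 1] + [(i, j)]
--
--         after_path.append(path[-1][-1])
--         three_paths.append(items[-1][-1])
--
--         for (p1, p2) in items[-1][-1]:
--             grid[p1][p2] = 0
--
--     return sum(after_path), three_paths
-- ===== SOURCE B (Python) =====
-- def triple_path_finder(grid):
--     total = 0
--     paths = []
--     for _ in range(3):
--         m = len(grid)
--         dp = []
--         for i in range(m):
--             row = []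
--             for j in range(len(grid[i])):
--                 if i == 0 and j == 0:
--                     v = grid[0][0]
--                 elif i == 0:
--                     v = grid[i][j] + row[j - 1]
--                 elif j == 0:
--                     v = grid[i][j] + dp[i - 1][0]
--                 else:
--                     up = dp[i - 1][j]
--                     left = row[j - 1]
--                     v = grid[i][j] + (up if up > left else left)
--                 row.append(v)
--             dp.append(row)
--         # walk back-pointers from the bottom-right corner, then reverse
--         i, j = m - 1, len(grid[m - 1]) - 1
--         rev = []
--         while True:
--             rev.append((i, j))
--             if i == 0 and j == 0:
--                 break
--             if i == 0:
--                 j -= 1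
--             elif j == 0:
--                 i -= 1
--             elif dp[i - 1][j] > dp[i][j - 1]:
--                 i -= 1
--             else:
--                 j -= 1
--         cells = rev[::-1]
--         total += dp[m - 1][-1]
--         paths.append(cells)
--         for (a, b) in cells:
--             grid[a][b] = 0
--     return total, paths
-- ===== Notes on version B (the rewrite author's own statement) =====
-- stated objective: faster
-- what changed: B replaces A's per-cell path-list table (items[i][j], copied and extended at every cell) by a value-only DP table plus a single backward walk over the back-pointer comparisons to reconstruct each of the three paths once, and accumulates the total instead of summing a list at the end.
import Mathlib
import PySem

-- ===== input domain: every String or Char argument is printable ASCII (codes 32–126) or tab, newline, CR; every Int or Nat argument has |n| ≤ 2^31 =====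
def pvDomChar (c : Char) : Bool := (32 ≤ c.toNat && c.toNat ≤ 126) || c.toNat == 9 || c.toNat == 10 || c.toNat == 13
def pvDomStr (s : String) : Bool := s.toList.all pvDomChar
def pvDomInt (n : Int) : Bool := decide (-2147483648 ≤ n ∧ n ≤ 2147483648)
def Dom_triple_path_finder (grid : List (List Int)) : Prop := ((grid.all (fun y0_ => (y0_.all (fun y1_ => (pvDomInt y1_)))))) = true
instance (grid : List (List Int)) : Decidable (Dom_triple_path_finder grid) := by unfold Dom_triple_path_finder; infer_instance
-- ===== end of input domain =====

-- B replaces A's per-cell path-list table (copied/extended at every cell, O(m·n·(m+n)) per round) by a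
-- value-only DP plus one backward walk reconstructing each path, O(m·n) per round; A mutates its grid
-- argument in place (zeroing used cells) and B performs the same mutation; the theorems are about the
-- return value.

-- shared 2-D table primitives (Python `t[i][j]` read with an in-range index, and `t[i][j] = v`)
def pvTget {α : Type} (t : List (List α)) (d : α) (i j : Nat) : α := (t.getD i []).getD j d
def pvSet2 {α : Type} (t : List (List α)) (i j : Nat) (v : α) : List (List α) :=
  t.set i ((t.getD i []).set j v)

-- ===== PORT A =====
-- the initialisation loops: path += [[]]; items += [[]]; path[i] += [0]; items[i] += [[]]
def pvInitA (grid : List (List Int)) : List (List Int) × List (List (List (Int × Int))) :=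
  grid.foldl (fun st row =>
    (st.1 ++ [row.foldl (fun r _ => r ++ [(0 : Int)]) []],
     st.2 ++ [row.foldl (fun r _ => r ++ [([] : List (Int × Int))]) []]))
    ([], [])

-- one body of A's innermost loop (the if/elif chain, in A's order, including the two dead elifs)
def pvCellA (grid : List (List Int))
    (st : List (List Int) × List (List (List (Int × Int)))) (i j : Nat) :
    List (List Int) × List (List (List (Int × Int))) :=
  let path := st.1
  let items := st.2
  if i = 0 ∧ j = 0 then
    (pvSet2 path i j (pvTget grid 0 i j), pvSet2 items i j [((i : Int), (j : Int))])
  else if i = 0 then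
    (pvSet2 path i j (pvTget grid 0 i j + pvTget path 0 i (j - 1)),
     pvSet2 items i j (pvTget items [] i (j - 1) ++ [((i : Int), (j : Int))]))
  else if j = 0 then
    (pvSet2 path i j (pvTget grid 0 i j + pvTget path 0 (i - 1) j),
     pvSet2 items i j (pvTget items [] (i - 1) j ++ [((i : Int), (j : Int))]))
  else if i = grid.length - 1 ∧ j = 0 then
    (pvSet2 path i j (pvTget grid 0 i j + pvTget path 0 (i - 1) j),
     pvSet2 items i j (pvTget items [] (i - 1) j ++ [((i : Int), (j : Int))]))
  else if i = 0 ∧ j = (grid.getD i []).length - 1 then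
    (pvSet2 path i j (pvTget grid 0 i j + pvTget path 0 i (j - 1)),
     pvSet2 items i j (pvTget items [] i (j - 1) ++ [((i : Int), (j : Int))]))
  else if pvTget path 0 (i - 1) j > pvTget path 0 i (j - 1) then
    (pvSet2 path i j (pvTget grid 0 i j + pvTget path 0 (i - 1) j),
     pvSet2 items i j (pvTget items [] (i - 1) j ++ [((i : Int), (j : Int))]))
  else
    (pvSet2 path i j (pvTget grid 0 i j + pvTget path 0 i (j - 1)),
     pvSet2 items i j (pvTget items [] i (j - 1) ++ [((i : Int), (j : Int))]))

-- one iteration of A's `for n in range(3)` loop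
def pvRoundA (st : List (List Int) × List (List Int) × List (List (List (Int × Int))) ×
    List Int × List (List (Int × Int))) :
    List (List Int) × List (List Int) × List (List (List (Int × Int))) ×
    List Int × List (List (Int × Int)) :=
  match st with
  | (grid, path, items, after, three) =>
    let pi := (List.range grid.length).foldl (fun pi i =>
        (List.range (grid.getD i []).length).foldl (fun pi j => pvCellA grid pi i j) pi)
      (path, items)
    let lastP := (pi.1.getLast?.getD []).getLast?.getD 0          -- path[-1][-1]
    let lastI := (pi.2.getLast?.getD []).getLast?.getD []          -- items[-1][-1]
    let grid' := lastI.foldl (fun g pq => pvSet2 g pq.1.toNat pq.2.toNat 0) grid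
    (grid', pi.1, pi.2, after ++ [lastP], three ++ [lastI])

def triple_path_finder (grid : List (List Int)) : Int × (List (List (Int × Int))) :=
  let init := pvInitA grid
  let st := (List.range 3).foldl (fun st _n => pvRoundA st)
    (grid, init.1, init.2, ([] : List Int), ([] : List (List (Int × Int))))
  (st.2.2.2.1.sum, st.2.2.2.2)

-- ===== PORT B =====
-- the value-only DP table (Source B's nested dp loops)
def pvDpB (grid : List (List Int)) : List (List Int) :=
  (List.range grid.length).foldl (fun dp i =>
    dp ++ [(List.range (grid.getD i []).length).foldl (fun row j =>
      let v :=
        if i = 0 ∧ j = 0 then pvTget grid 0 0 0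
        else if i = 0 then pvTget grid 0 i j + row.getD (j - 1) 0
        else if j = 0 then pvTget grid 0 i j + pvTget dp 0 (i - 1) 0
        else
          let up := pvTget dp 0 (i - 1) j
          let left := row.getD (j - 1) 0
          pvTget grid 0 i j + (if up > left then up else left)
      row ++ [v]) []]) []

-- Source B's `while True` back-pointer walk (appends (i,j), then steps up or left)
def pvWalkB (dp : List (List Int)) (i j : Nat) (rev : List (Int × Int)) : List (Int × Int) :=
  let rev' := rev ++ [((i : Int), (j : Int))]
  if _h1 : i = 0 ∧ j = 0 then rev'
  else if _h2 : i = 0 then pvWalkB dp i (j - 1) rev'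
  else if _h3 : j = 0 then pvWalkB dp (i - 1) j rev'
  else if pvTget dp 0 (i - 1) j > pvTget dp 0 i (j - 1) then pvWalkB dp (i - 1) j rev'
  else pvWalkB dp i (j - 1) rev'
termination_by i + j
decreasing_by all_goals omega

-- one iteration of Source B's `for _ in range(3)` loop
def pvRoundB (st : List (List Int) × Int × List (List (Int × Int))) :
    List (List Int) × Int × List (List (Int × Int)) :=
  match st with
  | (grid, total, paths) =>
    let dp := pvDpB grid
    let m := grid.length
    let cells := (pvWalkB dp (m - 1) ((grid.getD (m - 1) []).length - 1) []).reverse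
    let total' := total + ((dp.getD (m - 1) []).getLast?.getD 0)   -- dp[m-1][-1]
    let grid' := cells.foldl (fun g ab => pvSet2 g ab.1.toNat ab.2.toNat 0) grid
    (grid', total', paths ++ [cells])

def triple_path_finder_alt (grid : List (List Int)) : Int × (List (List (Int × Int))) :=
  let st := (List.range 3).foldl (fun st _n => pvRoundB st)
    (grid, (0 : Int), ([] : List (List (Int × Int))))
  (st.2.1, st.2.2)

-- ===== PRECONDITION & SPEC =====
-- Pre_ holds exactly where the Python A returns: it excludes only inputs on which A raises IndexError
-- (empty grid, a row longer than the row above it, or an empty last row).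
def Pre_triple_path_finder (grid : List (List Int)) : Prop :=
  grid ≠ [] ∧ List.IsChain (fun a b => b.length ≤ a.length) grid ∧ grid.getLast?.getD [] ≠ []
instance (grid : List (List Int)) : Decidable (Pre_triple_path_finder grid) := by
  unfold Pre_triple_path_finder; infer_instance

def pvWitness_triple_path_finder : List (List Int) := [[1, 2], [3, 4]]

def Spec_triple_path_finder (grid : List (List Int)) (out : Int × (List (List (Int × Int)))) : Prop :=
  out = triple_path_finder_alt grid
instance (grid : List (List Int)) (out : Int × (List (List (Int × Int)))) :
    Decidable (Spec_triple_path_finder grid out) := by unfold Spec_triple_path_finder; infer_instance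

-- ===== CLAIM (what is proved, stated in full; the proofs are below) =====
def Claim_equal_triple_path_finder : Prop :=
  ∀ (grid : List (List Int)), Dom_triple_path_finder grid → Pre_triple_path_finder grid →
    Spec_triple_path_finder grid (triple_path_finder grid)

-- ===== LEMMAS AND PROOFS =====

-- the functional DP value (what both A's `path` table and B's `dp` table hold at (i, j))
def pvSpecP (g : List (List Int)) : Nat → Nat → Int
  | 0, 0 => pvTget g 0 0 0
  | 0, j + 1 => pvTget g 0 0 (j + 1) + pvSpecP g 0 j
  | i + 1, 0 => pvTget g 0 (i + 1) 0 + pvSpecP g i 0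
  | i + 1, j + 1 => pvTget g 0 (i + 1) (j + 1) +
      (if pvSpecP g i (j + 1) > pvSpecP g (i + 1) j then pvSpecP g i (j + 1) else pvSpecP g (i + 1) j)
termination_by i j => (i, j)

-- the functional path (what A's `items` table holds, and what B's walk reconstructs)
def pvSpecI (g : List (List Int)) : Nat → Nat → List (Int × Int)
  | 0, 0 => [((0 : Int), (0 : Int))]
  | 0, j + 1 => pvSpecI g 0 j ++ [((0 : Int), ((j + 1 : Nat) : Int))]
  | i + 1, 0 => pvSpecI g i 0 ++ [(((i + 1 : Nat) : Int), (0 : Int))]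
  | i + 1, j + 1 =>
      (if pvSpecP g i (j + 1) > pvSpecP g (i + 1) j then pvSpecI g i (j + 1) else pvSpecI g (i + 1) j)
        ++ [(((i + 1 : Nat) : Int), ((j + 1 : Nat) : Int))]
termination_by i j => (i, j)

-- shape: t has exactly the row lengths of g
def pvSh {α : Type} (g : List (List Int)) (t : List (List α)) : Prop :=
  t.length = g.length ∧ ∀ k, (t.getD k []).length = (g.getD k []).length

-- row lengths are monotonically non-increasing
def pvMono (g : List (List Int)) : Prop :=
  ∀ a b, a ≤ b → (g.getD b []).length ≤ (g.getD a []).length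

theorem pvMono_step (g : List (List Int))
    (h : List.IsChain (fun a b : List Int => b.length ≤ a.length) g) (k : Nat) :
    (g.getD (k + 1) []).length ≤ (g.getD k []).length := by
  by_cases hk : k + 1 < g.length
  · rw [List.isChain_iff_getElem] at h
    have := h k (by omega)
    simp only [List.getD_eq_getElem?_getD,
      List.getElem?_eq_getElem (by omega : k < g.length),
      List.getElem?_eq_getElem (by omega : k + 1 < g.length), Option.getD_some]
    exact this
  · have : g[k+1]? = none := List.getElem?_eq_none (by omega)
    simp [List.getD_eq_getElem?_getD, this]

theorem pvMono_of_chain' (g : List (List Int))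
    (h : List.IsChain (fun a b : List Int => b.length ≤ a.length) g) : pvMono g := by
  intro a b hab
  induction b, hab using Nat.le_induction with
  | base => exact le_rfl
  | succ n hn ih => exact le_trans (pvMono_step g h n) ih

theorem pvSet2_length {α : Type} (t : List (List α)) (i j : Nat) (v : α) :
    (pvSet2 t i j v).length = t.length := by
  simp [pvSet2]

theorem pvSet2_rowlen {α : Type} (t : List (List α)) (i j : Nat) (v : α) (k : Nat) :
    ((pvSet2 t i j v).getD k []).length = (t.getD k []).length := by
  by_cases hil : i < t.length
  · by_cases hk : k = i
    · subst hk
      simp [pvSet2, List.getD_eq_getElem?_getD, List.getElem?_set_self hil]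
    · simp [pvSet2, List.getD_eq_getElem?_getD, List.getElem?_set_ne (by omega : i ≠ k)]
  · rw [pvSet2, List.set_eq_of_length_le (by omega)]

theorem pvTget_set2_eq {α : Type} (t : List (List α)) (d : α) (i j : Nat) (v : α)
    (hi : i < t.length) (hj : j < (t.getD i []).length) :
    pvTget (pvSet2 t i j v) d i j = v := by
  have hj' : j < (t[i]?.getD []).length := by
    rw [← List.getD_eq_getElem?_getD]; exact hj
  simp [pvTget, pvSet2, List.getD_eq_getElem?_getD, List.getElem?_set_self hi,
    List.getElem?_set_self hj']

theorem pvTget_set2_ne {α : Type} (t : List (List α)) (d : α) (i j a b : Nat) (v : α)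
    (h : a ≠ i ∨ b ≠ j) :
    pvTget (pvSet2 t i j v) d a b = pvTget t d a b := by
  by_cases hil : i < t.length
  · by_cases hk : a = i
    · subst hk
      have hb : b ≠ j := by tauto
      simp [pvTget, pvSet2, List.getD_eq_getElem?_getD, List.getElem?_set_self hil,
        List.getElem?_set_ne (by omega : j ≠ b)]
    · simp [pvTget, pvSet2, List.getD_eq_getElem?_getD, List.getElem?_set_ne (by omega : i ≠ a)]
  · rw [pvSet2, List.set_eq_of_length_le (by omega)]

-- A's cell update computes the spec at (i,j) and touches nothing else
theorem pvCellA_spec (g : List (List Int)) (hg : pvMono g)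
    (path : List (List Int)) (items : List (List (List (Int × Int)))) (i j : Nat)
    (hp : pvSh g path) (hit : pvSh g items)
    (hi : i < g.length) (hj : j < (g.getD i []).length)
    (Hrow : ∀ b, b < j → pvTget path 0 i b = pvSpecP g i b ∧ pvTget items [] i b = pvSpecI g i b)
    (Hprev : ∀ a, a < i → ∀ b, b < (g.getD a []).length →
      pvTget path 0 a b = pvSpecP g a b ∧ pvTget items [] a b = pvSpecI g a b) :
    pvSh g (pvCellA g (path, items) i j).1 ∧ pvSh g (pvCellA g (path, items) i j).2 ∧
    pvTget (pvCellA g (path, items) i j).1 0 i j = pvSpecP g i j ∧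
    pvTget (pvCellA g (path, items) i j).2 [] i j = pvSpecI g i j ∧
    (∀ a b, (a ≠ i ∨ b ≠ j) →
      pvTget (pvCellA g (path, items) i j).1 0 a b = pvTget path 0 a b ∧
      pvTget (pvCellA g (path, items) i j).2 [] a b = pvTget items [] a b) := by
  have hpl : i < path.length := by rw [hp.1]; exact hi
  have hpr : j < (path.getD i []).length := by rw [hp.2 i]; exact hj
  have hil : i < items.length := by rw [hit.1]; exact hi
  have hir : j < (items.getD i []).length := by rw [hit.2 i]; exact hj
  have hsh1 : ∀ v, pvSh g (pvSet2 path i j v) := fun v =>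
    ⟨by simp [pvSet2_length, hp.1], fun k => by rw [pvSet2_rowlen]; exact hp.2 k⟩
  have hsh2 : ∀ v, pvSh g (pvSet2 items i j v) := fun v =>
    ⟨by simp [pvSet2_length, hit.1], fun k => by rw [pvSet2_rowlen]; exact hit.2 k⟩
  have hun : ∀ (v : Int) (c : List (Int × Int)) (a b : Nat), (a ≠ i ∨ b ≠ j) →
      pvTget (pvSet2 path i j v) 0 a b = pvTget path 0 a b ∧
      pvTget (pvSet2 items i j c) [] a b = pvTget items [] a b := fun v c a b hab =>
    ⟨pvTget_set2_ne _ _ _ _ _ _ _ hab, pvTget_set2_ne _ _ _ _ _ _ _ hab⟩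
  unfold pvCellA
  dsimp only
  split_ifs with h1 h2 h3 h4 h5 h6
  · -- i = 0, j = 0
    obtain ⟨rfl, rfl⟩ := h1
    exact ⟨hsh1 _, hsh2 _, by rw [pvTget_set2_eq _ _ _ _ _ hpl hpr]; simp [pvSpecP],
      by rw [pvTget_set2_eq _ _ _ _ _ hil hir]; simp [pvSpecI], hun _ _⟩
  · -- i = 0, j = k + 1
    obtain ⟨k, rfl⟩ : ∃ k, j = k + 1 := ⟨j - 1, by omega⟩
    subst h2
    refine ⟨hsh1 _, hsh2 _, ?_, ?_, hun _ _⟩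
    · rw [pvTget_set2_eq _ _ _ _ _ hpl hpr, Nat.add_sub_cancel, (Hrow k (by omega)).1]
      simp [pvSpecP]
    · rw [pvTget_set2_eq _ _ _ _ _ hil hir, Nat.add_sub_cancel, (Hrow k (by omega)).2]
      simp [pvSpecI]
  · -- j = 0, i = a + 1
    obtain ⟨a, rfl⟩ : ∃ a, i = a + 1 := ⟨i - 1, by omega⟩
    subst h3
    have h0 : 0 < (g.getD a []).length := lt_of_lt_of_le hj (hg a (a + 1) (by omega))
    refine ⟨hsh1 _, hsh2 _, ?_, ?_, hun _ _⟩
    · rw [pvTget_set2_eq _ _ _ _ _ hpl hpr, Nat.add_sub_cancel, (Hprev a (by omega) 0 h0).1]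
      simp [pvSpecP]
    · rw [pvTget_set2_eq _ _ _ _ _ hil hir, Nat.add_sub_cancel, (Hprev a (by omega) 0 h0).2]
      simp [pvSpecI]
  · exact absurd h4.2 h3
  · exact absurd h5.1 h2
  · -- interior, up wins
    obtain ⟨a, rfl⟩ : ∃ a, i = a + 1 := ⟨i - 1, by omega⟩
    obtain ⟨b, rfl⟩ : ∃ b, j = b + 1 := ⟨j - 1, by omega⟩
    rw [Nat.add_sub_cancel, Nat.add_sub_cancel] at h6
    have hup := Hprev a (by omega) (b + 1) (lt_of_lt_of_le hj (hg a (a + 1) (by omega)))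
    have hleft := Hrow b (by omega)
    rw [hup.1, hleft.1] at h6
    refine ⟨hsh1 _, hsh2 _, ?_, ?_, hun _ _⟩
    · rw [pvTget_set2_eq _ _ _ _ _ hpl hpr]
      simp only [Nat.add_sub_cancel]
      rw [hup.1]
      simp [pvSpecP, h6]
    · rw [pvTget_set2_eq _ _ _ _ _ hil hir]
      simp only [Nat.add_sub_cancel]
      rw [hup.2]
      simp [pvSpecI, h6]
  · -- interior, left wins
    obtain ⟨a, rfl⟩ : ∃ a, i = a + 1 := ⟨i - 1, by omega⟩
    obtain ⟨b, rfl⟩ : ∃ b, j = b + 1 := ⟨j - 1, by omega⟩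
    rw [Nat.add_sub_cancel, Nat.add_sub_cancel] at h6
    have hup := Hprev a (by omega) (b + 1) (lt_of_lt_of_le hj (hg a (a + 1) (by omega)))
    have hleft := Hrow b (by omega)
    rw [hup.1, hleft.1] at h6
    refine ⟨hsh1 _, hsh2 _, ?_, ?_, hun _ _⟩
    · rw [pvTget_set2_eq _ _ _ _ _ hpl hpr]
      simp only [Nat.add_sub_cancel]
      rw [hleft.1]
      simp [pvSpecP, h6]
    · rw [pvTget_set2_eq _ _ _ _ _ hil hir]
      simp only [Nat.add_sub_cancel]
      rw [hleft.2]
      simp [pvSpecI, h6]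

-- A's inner loop over row i
theorem pvRowA_spec (g : List (List Int)) (hg : pvMono g)
    (path : List (List Int)) (items : List (List (List (Int × Int)))) (i : Nat)
    (hp : pvSh g path) (hit : pvSh g items) (hi : i < g.length)
    (Hprev : ∀ a, a < i → ∀ b, b < (g.getD a []).length →
      pvTget path 0 a b = pvSpecP g a b ∧ pvTget items [] a b = pvSpecI g a b)
    (jmax : Nat) (hjm : jmax ≤ (g.getD i []).length) :
    pvSh g ((List.range jmax).foldl (fun pi j => pvCellA g pi i j) (path, items)).1 ∧
    pvSh g ((List.range jmax).foldl (fun pi j => pvCellA g pi i j) (path, items)).2 ∧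
    (∀ a, a < i → ∀ b, b < (g.getD a []).length →
      pvTget ((List.range jmax).foldl (fun pi j => pvCellA g pi i j) (path, items)).1 0 a b = pvSpecP g a b ∧
      pvTget ((List.range jmax).foldl (fun pi j => pvCellA g pi i j) (path, items)).2 [] a b = pvSpecI g a b) ∧
    (∀ b, b < jmax →
      pvTget ((List.range jmax).foldl (fun pi j => pvCellA g pi i j) (path, items)).1 0 i b = pvSpecP g i b ∧
      pvTget ((List.range jmax).foldl (fun pi j => pvCellA g pi i j) (path, items)).2 [] i b = pvSpecI g i b) := by
  induction jmax with
  | zero =>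
    exact ⟨hp, hit, fun a ha b hb => Hprev a ha b hb, fun b hb => absurd hb (by omega)⟩
  | succ j ih =>
    obtain ⟨s1, s2, s3, s4⟩ := ih (by omega)
    rw [List.range_succ, List.foldl_append, List.foldl_cons, List.foldl_nil] at *
    rcases hPI : (List.range j).foldl (fun pi j => pvCellA g pi i j) (path, items) with ⟨P, I⟩
    rw [hPI] at s1 s2 s3 s4
    have hc := pvCellA_spec g hg P I i j s1 s2 hi (by omega)
      (fun b hb => s4 b hb) (fun a ha b hb => s3 a ha b hb)
    refine ⟨hc.1, hc.2.1, ?_, ?_⟩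
    · intro a ha b hb
      have h := hc.2.2.2.2 a b (Or.inl (by omega))
      exact ⟨h.1.trans (s3 a ha b hb).1, h.2.trans (s3 a ha b hb).2⟩
    · intro b hb
      by_cases hbj : b = j
      · subst hbj
        exact ⟨hc.2.2.1, hc.2.2.2.1⟩
      · have h := hc.2.2.2.2 i b (Or.inr hbj)
        exact ⟨h.1.trans (s4 b (by omega)).1, h.2.trans (s4 b (by omega)).2⟩

-- A's double loop fills the whole table with the spec
theorem pvTblA_spec (g : List (List Int)) (hg : pvMono g)
    (path : List (List Int)) (items : List (List (List (Int × Int))))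
    (hp : pvSh g path) (hit : pvSh g items) (imax : Nat) (him : imax ≤ g.length) :
    pvSh g ((List.range imax).foldl (fun pi i =>
        (List.range (g.getD i []).length).foldl (fun pi j => pvCellA g pi i j) pi) (path, items)).1 ∧
    pvSh g ((List.range imax).foldl (fun pi i =>
        (List.range (g.getD i []).length).foldl (fun pi j => pvCellA g pi i j) pi) (path, items)).2 ∧
    (∀ a, a < imax → ∀ b, b < (g.getD a []).length →
      pvTget ((List.range imax).foldl (fun pi i =>
        (List.range (g.getD i []).length).foldl (fun pi j => pvCellA g pi i j) pi) (path, items)).1 0 a b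
        = pvSpecP g a b ∧
      pvTget ((List.range imax).foldl (fun pi i =>
        (List.range (g.getD i []).length).foldl (fun pi j => pvCellA g pi i j) pi) (path, items)).2 [] a b
        = pvSpecI g a b) := by
  induction imax with
  | zero =>
    exact ⟨hp, hit, fun a ha => absurd ha (by omega)⟩
  | succ i ih =>
    obtain ⟨s1, s2, s3⟩ := ih (by omega)
    rw [List.range_succ, List.foldl_append, List.foldl_cons, List.foldl_nil] at *
    rcases hPI : (List.range i).foldl (fun pi i =>
        (List.range (g.getD i []).length).foldl (fun pi j => pvCellA g pi i j) pi) (path, items)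
      with ⟨P, I⟩
    rw [hPI] at s1 s2 s3
    have hr := pvRowA_spec g hg P I i s1 s2 (by omega)
      (fun a ha b hb => s3 a ha b hb) (g.getD i []).length le_rfl
    refine ⟨hr.1, hr.2.1, ?_⟩
    intro a ha b hb
    by_cases hai : a = i
    · subst hai
      exact hr.2.2.2 b hb
    · exact hr.2.2.1 a (by omega) b hb

theorem pvMapRange_getD {α : Type} (f : Nat → α) (n k : Nat) (d : α) (h : k < n) :
    ((List.range n).map f).getD k d = f k := by
  simp [List.getD_eq_getElem?_getD, h]

-- reading the (fully or partially built) spec table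
theorem pvPrefix_get (g : List (List Int)) (n a b : Nat) (ha : a < n)
    (hb : b < (g.getD a []).length) :
    pvTget ((List.range n).map (fun i =>
      (List.range (g.getD i []).length).map (pvSpecP g i))) 0 a b = pvSpecP g a b := by
  rw [pvTget, pvMapRange_getD _ _ _ _ ha, pvMapRange_getD _ _ _ _ hb]

-- B's inner loop builds row i of the spec table
theorem pvRowB_spec (g : List (List Int)) (hg : pvMono g) (i : Nat) (hi : i < g.length)
    (jmax : Nat) (hjm : jmax ≤ (g.getD i []).length) :
    (List.range jmax).foldl (fun row j =>
      let v :=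
        if i = 0 ∧ j = 0 then pvTget g 0 0 0
        else if i = 0 then pvTget g 0 i j + row.getD (j - 1) 0
        else if j = 0 then pvTget g 0 i j +
          pvTget ((List.range i).map (fun a =>
            (List.range ((g.getD a []).length)).map (pvSpecP g a))) 0 (i - 1) 0
        else
          let up := pvTget ((List.range i).map (fun a =>
            (List.range ((g.getD a []).length)).map (pvSpecP g a))) 0 (i - 1) j
          let left := row.getD (j - 1) 0
          pvTget g 0 i j + (if up > left then up else left)
      row ++ [v]) [] = (List.range jmax).map (pvSpecP g i) := by
  induction jmax with
  | zero => simp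
  | succ j ih =>
    rw [List.range_succ, List.foldl_append, List.foldl_cons, List.foldl_nil, ih (by omega),
      List.map_append, List.map_cons, List.map_nil]
    dsimp only
    have hj : j < (g.getD i []).length := by omega
    split_ifs with h1 h2 h3 h4
    · obtain ⟨rfl, rfl⟩ := h1
      simp [pvSpecP]
    · subst h2
      obtain ⟨k, rfl⟩ : ∃ k, j = k + 1 := ⟨j - 1, by omega⟩
      rw [Nat.add_sub_cancel, pvMapRange_getD _ _ _ _ (by omega : k < k + 1)]
      simp [pvSpecP]
    · subst h3
      obtain ⟨a, rfl⟩ : ∃ a, i = a + 1 := ⟨i - 1, by omega⟩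
      rw [Nat.add_sub_cancel, pvPrefix_get g (a + 1) a 0 (by omega)
        (lt_of_lt_of_le hj (hg a (a + 1) (by omega)))]
      simp [pvSpecP]
    · -- interior, up wins
      obtain ⟨a, rfl⟩ : ∃ a, i = a + 1 := ⟨i - 1, by omega⟩
      obtain ⟨b, rfl⟩ : ∃ b, j = b + 1 := ⟨j - 1, by omega⟩
      have hub : b + 1 < (g.getD a []).length :=
        lt_of_lt_of_le hj (hg a (a + 1) (by omega))
      simp only [Nat.add_sub_cancel] at h4 ⊢
      rw [pvPrefix_get g (a + 1) a (b + 1) (by omega) hub,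
        pvMapRange_getD _ _ _ _ (by omega : b < b + 1)] at h4
      rw [pvSpecP]
      rw [if_pos h4, pvPrefix_get g (a + 1) a (b + 1) (by omega) hub]
    · -- interior, left wins
      obtain ⟨a, rfl⟩ : ∃ a, i = a + 1 := ⟨i - 1, by omega⟩
      obtain ⟨b, rfl⟩ : ∃ b, j = b + 1 := ⟨j - 1, by omega⟩
      have hub : b + 1 < (g.getD a []).length :=
        lt_of_lt_of_le hj (hg a (a + 1) (by omega))
      simp only [Nat.add_sub_cancel] at h4 ⊢
      rw [pvPrefix_get g (a + 1) a (b + 1) (by omega) hub,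
        pvMapRange_getD _ _ _ _ (by omega : b < b + 1)] at h4
      rw [pvSpecP]
      rw [if_neg h4, pvMapRange_getD _ _ _ _ (by omega : b < b + 1)]

-- B's dp is exactly the spec table
theorem pvDpB_spec (g : List (List Int)) (hg : pvMono g) :
    pvDpB g = (List.range g.length).map (fun i =>
      (List.range (g.getD i []).length).map (pvSpecP g i)) := by
  suffices h : ∀ imax, imax ≤ g.length →
      (List.range imax).foldl (fun dp i =>
        dp ++ [(List.range (g.getD i []).length).foldl (fun row j =>
          let v :=
            if i = 0 ∧ j = 0 then pvTget g 0 0 0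
            else if i = 0 then pvTget g 0 i j + row.getD (j - 1) 0
            else if j = 0 then pvTget g 0 i j + pvTget dp 0 (i - 1) 0
            else
              let up := pvTget dp 0 (i - 1) j
              let left := row.getD (j - 1) 0
              pvTget g 0 i j + (if up > left then up else left)
          row ++ [v]) []]) [] =
      (List.range imax).map (fun i => (List.range (g.getD i []).length).map (pvSpecP g i)) by
    exact h g.length le_rfl
  intro imax him
  induction imax with
  | zero => simp
  | succ i ih =>
    rw [List.range_succ, List.foldl_append, List.foldl_cons, List.foldl_nil, ih (by omega),
      List.map_append, List.map_cons, List.map_nil]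
    congr 2
    exact pvRowB_spec g hg i (by omega) (g.getD i []).length le_rfl

-- B's walk reconstructs the spec path in reverse
theorem pvWalkB_spec (g : List (List Int)) (hg : pvMono g)
    (dp : List (List Int))
    (hdp : dp = (List.range g.length).map (fun i =>
      (List.range (g.getD i []).length).map (pvSpecP g i)))
    (N i j : Nat) (hN : i + j ≤ N) (hi : i < g.length) (hj : j < (g.getD i []).length)
    (rev : List (Int × Int)) :
    pvWalkB dp i j rev = rev ++ (pvSpecI g i j).reverse := by
  subst hdp
  induction N generalizing i j rev with
  | zero =>
    have hij : i = 0 ∧ j = 0 := by omega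
    obtain ⟨rfl, rfl⟩ := hij
    rw [pvWalkB]
    simp [pvSpecI]
  | succ N ih =>
    rw [pvWalkB]
    split_ifs with h1 h2 h3 h4
    · obtain ⟨rfl, rfl⟩ := h1
      simp [pvSpecI]
    · subst h2
      obtain ⟨k, rfl⟩ : ∃ k, j = k + 1 := ⟨j - 1, by omega⟩
      rw [Nat.add_sub_cancel, ih 0 k (by omega) hi (by omega)]
      rw [pvSpecI]
      simp
    · subst h3
      obtain ⟨a, rfl⟩ : ∃ a, i = a + 1 := ⟨i - 1, by omega⟩
      rw [Nat.add_sub_cancel, ih a 0 (by omega) (by omega)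
        (lt_of_lt_of_le hj (hg a (a + 1) (by omega)))]
      rw [pvSpecI]
      simp
    · obtain ⟨a, rfl⟩ : ∃ a, i = a + 1 := ⟨i - 1, by omega⟩
      obtain ⟨b, rfl⟩ : ∃ b, j = b + 1 := ⟨j - 1, by omega⟩
      simp only [Nat.add_sub_cancel] at h4 ⊢
      have hup : b + 1 < (g.getD a []).length :=
        lt_of_lt_of_le hj (hg a (a + 1) (by omega))
      rw [pvPrefix_get g g.length a (b + 1) (by omega) hup,
        pvPrefix_get g g.length (a + 1) b (by omega) (by omega)] at h4
      rw [ih a (b + 1) (by omega) (by omega) hup]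
      rw [pvSpecI]
      simp [h4]
    · obtain ⟨a, rfl⟩ : ∃ a, i = a + 1 := ⟨i - 1, by omega⟩
      obtain ⟨b, rfl⟩ : ∃ b, j = b + 1 := ⟨j - 1, by omega⟩
      simp only [Nat.add_sub_cancel] at h4 ⊢
      have hup : b + 1 < (g.getD a []).length :=
        lt_of_lt_of_le hj (hg a (a + 1) (by omega))
      rw [pvPrefix_get g g.length a (b + 1) (by omega) hup,
        pvPrefix_get g g.length (a + 1) b (by omega) (by omega)] at h4
      rw [ih (a + 1) b (by omega) (by omega) (by omega)]
      rw [pvSpecI]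
      simp [h4]

theorem pvFoldlAppendMap {α β : Type} (l : List α) (f : α → β) (init : List β) :
    l.foldl (fun s x => s ++ [f x]) init = init ++ l.map f := by
  induction l generalizing init <;> simp_all

theorem pvFoldlPairAppend {α β γ : Type} (l : List α) (f : α → β) (h : α → γ)
    (s1 : List β) (s2 : List γ) :
    l.foldl (fun st x => (st.1 ++ [f x], st.2 ++ [h x])) (s1, s2) = (s1 ++ l.map f, s2 ++ l.map h) := by
  induction l generalizing s1 s2 with
  | nil => simp
  | cons a l ih => simp [ih]

theorem pvLastGetD {α : Type} (l : List α) (d : α) :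
    l.getLast?.getD d = l.getD (l.length - 1) d := by
  rw [List.getLast?_eq_getElem?, List.getD_eq_getElem?_getD]

theorem pvInitA_eq (g : List (List Int)) :
    pvInitA g = (g.map (fun row => row.map (fun _ => (0 : Int))),
                 g.map (fun row => row.map (fun _ => ([] : List (Int × Int))))) := by
  unfold pvInitA
  simp only [pvFoldlAppendMap, List.nil_append]
  simpa using pvFoldlPairAppend g (fun row => row.map (fun _ => (0 : Int)))
    (fun row => row.map (fun _ => ([] : List (Int × Int)))) [] []

theorem pvSh_map {α : Type} (g : List (List Int)) (f : Int → α) :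
    pvSh g (g.map (fun row => row.map f)) := by
  refine ⟨by simp, fun k => ?_⟩
  by_cases hk : k < g.length
  · simp [List.getD_eq_getElem?_getD, List.getElem?_eq_getElem hk]
  · have h1 : (g.map (fun row => row.map f))[k]? = none := List.getElem?_eq_none (by simpa using hk)
    have h2 : g[k]? = none := List.getElem?_eq_none (by omega)
    simp [List.getD_eq_getElem?_getD, h1, h2]

theorem pvSh_trans {α : Type} (g g' : List (List Int)) (t : List (List α))
    (h1 : pvSh g t) (h2 : pvSh g g') : pvSh g' t :=
  ⟨h1.1.trans h2.1.symm, fun k => (h1.2 k).trans (h2.2 k).symm⟩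

theorem pvPre_of_sh (g g' : List (List Int)) (h : pvSh g g')
    (hp : Pre_triple_path_finder g) : Pre_triple_path_finder g' := by
  obtain ⟨hne, hch, hlast⟩ := hp
  have hlen : g'.length = g.length := h.1
  have hrow : ∀ k, ∀ hk : k < g.length, (g'[k]'(by omega)).length = (g[k]'hk).length := by
    intro k hk
    have e := h.2 k
    rwa [List.getD_eq_getElem?_getD, List.getD_eq_getElem?_getD,
      List.getElem?_eq_getElem (by omega : k < g'.length),
      List.getElem?_eq_getElem hk] at e
  refine ⟨?_, ?_, ?_⟩
  · intro h0
    apply hne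
    apply List.length_eq_zero_iff.mp
    rw [← hlen, h0]
    rfl
  · rw [List.isChain_iff_getElem] at hch ⊢
    intro k hk
    have hk' : k + 1 < g.length := by omega
    have e1 := hrow k (by omega)
    have e2 := hrow (k + 1) (by omega)
    rw [e1, e2]
    exact hch k hk'
  · have hg' : g'.getLast?.getD [] = g'.getD (g.length - 1) [] := by
      rw [pvLastGetD, hlen]
    have hgl : g.getLast?.getD [] = g.getD (g.length - 1) [] := pvLastGetD g []
    rw [hgl] at hlast
    rw [hg']
    intro h0
    apply hlast
    apply List.length_eq_zero_iff.mp
    rw [← h.2 (g.length - 1), h0]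
    rfl

theorem pvZero_sh (g : List (List Int)) (cells : List (Int × Int)) :
    pvSh g (cells.foldl (fun t ab => pvSet2 t ab.1.toNat ab.2.toNat 0) g) := by
  suffices h : ∀ t : List (List Int), pvSh g t →
      pvSh g (cells.foldl (fun t ab => pvSet2 t ab.1.toNat ab.2.toNat 0) t) from
    h g ⟨rfl, fun _ => rfl⟩
  induction cells with
  | nil => exact fun t ht => ht
  | cons c cs ih =>
    intro t ht
    simp only [List.foldl_cons]
    exact ih _ ⟨by simp [pvSet2_length, ht.1], fun k => (pvSet2_rowlen _ _ _ _ k).trans (ht.2 k)⟩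

-- one round of A and one round of B agree
theorem pvRound_eq (g : List (List Int)) (hp : Pre_triple_path_finder g)
    (path : List (List Int)) (items : List (List (List (Int × Int))))
    (hsp : pvSh g path) (hsi : pvSh g items)
    (after : List Int) (three : List (List (Int × Int))) (total : Int)
    (paths : List (List (Int × Int))) :
    ∃ g' X C path' items',
      pvRoundA (g, path, items, after, three) = (g', path', items', after ++ [X], three ++ [C]) ∧
      pvRoundB (g, total, paths) = (g', total + X, paths ++ [C]) ∧
      Pre_triple_path_finder g' ∧ pvSh g' path' ∧ pvSh g' items' := by
  have hm := pvMono_of_chain' g hp.2.1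
  have hmpos : 0 < g.length := List.length_pos_iff.mpr hp.1
  have hLpos : 0 < (g.getD (g.length - 1) []).length := by
    rcases Nat.eq_zero_or_pos (g.getD (g.length - 1) []).length with h0 | h0
    · exact absurd (by rw [pvLastGetD]; exact List.length_eq_zero_iff.mp h0) hp.2.2
    · exact h0
  obtain ⟨hsh1, hsh2, hval⟩ := pvTblA_spec g hm path items hsp hsi g.length le_rfl
  rcases hT : (List.range g.length).foldl (fun pi i =>
      (List.range (g.getD i []).length).foldl (fun pi j => pvCellA g pi i j) pi) (path, items)
    with ⟨P, I⟩
  rw [hT] at hsh1 hsh2 hval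
  have hXP : (P.getLast?.getD []).getLast?.getD 0 =
      pvSpecP g (g.length - 1) ((g.getD (g.length - 1) []).length - 1) := by
    rw [pvLastGetD, pvLastGetD, hsh1.1, hsh1.2 (g.length - 1)]
    exact (hval (g.length - 1) (by omega) ((g.getD (g.length - 1) []).length - 1) (by omega)).1
  have hXI : (I.getLast?.getD []).getLast?.getD [] =
      pvSpecI g (g.length - 1) ((g.getD (g.length - 1) []).length - 1) := by
    rw [pvLastGetD, pvLastGetD, hsh2.1, hsh2.2 (g.length - 1)]
    exact (hval (g.length - 1) (by omega) ((g.getD (g.length - 1) []).length - 1) (by omega)).2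
  have hdp := pvDpB_spec g hm
  have hXB : ((pvDpB g).getD (g.length - 1) []).getLast?.getD 0 =
      pvSpecP g (g.length - 1) ((g.getD (g.length - 1) []).length - 1) := by
    rw [hdp, pvMapRange_getD _ _ _ _ (by omega : g.length - 1 < g.length), pvLastGetD,
      List.length_map, List.length_range,
      pvMapRange_getD _ _ _ _ (by omega : (g.getD (g.length - 1) []).length - 1 <
        (g.getD (g.length - 1) []).length)]
  have hcells : (pvWalkB (pvDpB g) (g.length - 1) ((g.getD (g.length - 1) []).length - 1)
      []).reverse = pvSpecI g (g.length - 1) ((g.getD (g.length - 1) []).length - 1) := by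
    rw [hdp, pvWalkB_spec g hm _ rfl ((g.length - 1) + ((g.getD (g.length - 1) []).length - 1))
      (g.length - 1) ((g.getD (g.length - 1) []).length - 1) le_rfl (by omega) (by omega) []]
    simp
  refine ⟨(pvSpecI g (g.length - 1) ((g.getD (g.length - 1) []).length - 1)).foldl
      (fun t ab => pvSet2 t ab.1.toNat ab.2.toNat 0) g,
    pvSpecP g (g.length - 1) ((g.getD (g.length - 1) []).length - 1),
    pvSpecI g (g.length - 1) ((g.getD (g.length - 1) []).length - 1), P, I, ?_, ?_, ?_, ?_, ?_⟩
  · simp only [pvRoundA]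
    rw [hT]
    rw [hXP, hXI]
  · simp only [pvRoundB]
    rw [hXB, hcells]
  · exact pvPre_of_sh g _ (pvZero_sh g _) hp
  · exact pvSh_trans g _ P hsh1 (pvZero_sh g _)
  · exact pvSh_trans g _ I hsh2 (pvZero_sh g _)

-- ===== VERDICT (by name: the statement is the Claim_ definition above) =====
theorem triple_path_finder_spec : Claim_equal_triple_path_finder := by
  intro grid _dom hpre
  unfold Spec_triple_path_finder triple_path_finder triple_path_finder_alt
  have hinit := pvInitA_eq grid
  have hs1 : pvSh grid (pvInitA grid).1 := by rw [hinit]; exact pvSh_map _ _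
  have hs2 : pvSh grid (pvInitA grid).2 := by rw [hinit]; exact pvSh_map _ _
  obtain ⟨g1, X1, C1, p1, i1, hA1, hB1, hp1, hsp1, hsi1⟩ :=
    pvRound_eq grid hpre (pvInitA grid).1 (pvInitA grid).2 hs1 hs2 [] [] 0 []
  obtain ⟨g2, X2, C2, p2, i2, hA2, hB2, hp2, hsp2, hsi2⟩ :=
    pvRound_eq g1 hp1 p1 i1 hsp1 hsi1 ([] ++ [X1]) ([] ++ [C1]) (0 + X1) ([] ++ [C1])
  obtain ⟨g3, X3, C3, p3, i3, hA3, hB3, hp3, hsp3, hsi3⟩ :=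
    pvRound_eq g2 hp2 p2 i2 hsp2 hsi2 ([] ++ [X1] ++ [X2]) ([] ++ [C1] ++ [C2]) (0 + X1 + X2)
      ([] ++ [C1] ++ [C2])
  have hr : List.range 3 = [0, 1, 2] := rfl
  rw [hr]
  simp only [List.foldl_cons, List.foldl_nil]
  rw [hA1, hA2, hA3, hB1, hB2, hB3]
  simp [add_assoc]
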